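-- pv_equiv track=rewrite | github.com/urusakuma/AtCoder | contest/abc437/b/main.py | solve
-- ===== SOURCE A (Python) =====
-- from typing import List, Set, Tuple, Any  # type: ignore
--
-- def solve(H: int, W: int, N: int, A: List[Set[int]], B: List[int]) -> int:
--     c = [0]*H
--     for i in range(N):
--         for h in range(H):
--             if B[i] in A[h]:
--                 c[h] += 1
--                 break
--     return max(c)
-- ===== SOURCE B (Python) =====
-- def solve(H, W, N, A, B):
--     # Pass 1: index each value by the first row (in 0..H-1) that contains it.
--     first = {}
--     for h in range(H):
--         for v in A[h]:
--             if v not in first: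
--                 first[v] = h
--     # Pass 2: count the queries.
--     cnt = {}
--     for i in range(N):
--         cnt[B[i]] = cnt.get(B[i], 0) + 1
--     # Pass 3: aggregate per DISTINCT query value into its first containing row.
--     rows = [0] * H
--     for v, k in cnt.items():
--         if v in first:
--             rows[first[v]] += k
--     return max(rows)
-- ===== Notes on version B (the rewrite author's own statement) =====
-- stated objective: alternative
-- what changed: A scans the rows once per individual query (query-major nested loop with break); B makes three differently-shaped passes: build a value->first-row index over the grid, count queries into a dict, then aggregate per DISTINCT query value into a rows array and take its max.
-- outside the precondition, e.g. on solve(2, 1, 1, [{5}], [5]): A returns 1, B raises IndexError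
import Mathlib
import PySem

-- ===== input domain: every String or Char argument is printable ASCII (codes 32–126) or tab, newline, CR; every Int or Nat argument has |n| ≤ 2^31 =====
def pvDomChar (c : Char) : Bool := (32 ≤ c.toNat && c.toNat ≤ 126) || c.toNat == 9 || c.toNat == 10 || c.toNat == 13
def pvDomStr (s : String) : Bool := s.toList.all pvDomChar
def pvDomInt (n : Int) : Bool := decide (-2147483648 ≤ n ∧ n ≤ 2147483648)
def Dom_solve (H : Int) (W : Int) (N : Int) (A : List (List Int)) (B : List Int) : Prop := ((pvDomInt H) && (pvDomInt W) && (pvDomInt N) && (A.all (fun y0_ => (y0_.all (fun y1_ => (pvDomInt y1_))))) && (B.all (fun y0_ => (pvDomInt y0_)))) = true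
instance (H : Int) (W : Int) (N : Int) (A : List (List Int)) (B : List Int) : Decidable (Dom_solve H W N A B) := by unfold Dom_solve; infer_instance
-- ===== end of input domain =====

-- B replaces A's query-major nested scan (first matching row per query, with break) by three passes:
-- a value->first-row index over the grid, a query counter dict, and a per-distinct-value aggregation into a rows array.


-- ===== PORT A =====
-- inner 'for h in range(H): if B[i] in A[h]: c[h] += 1; break' (A[h], c[h] total via getD/setD: Pre_ keeps the indices in range)
def solveInner (b : Int) (A : List (List Int)) (hs : List Int) (c : List Int) : List Int :=
  match hs with
  | [] => c
  | h :: rest =>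
    if b ∈ PySem.List.pyGetD A h [] then
      PySem.List.pySetD c h (PySem.List.pyGetD c h 0 + 1)
    else solveInner b A rest c

def solve (H : Int) (W : Int) (N : Int) (A : List (List Int)) (B : List Int) : Int :=
  let c0 := PySem.List.pyRepeat [(0 : Int)] H
  let c := (PySem.List.pyRange 0 N 1).foldl
    (fun c i => solveInner (PySem.List.pyGetD B i 0) A (PySem.List.pyRange 0 H 1) c) c0
  (PySem.List.max? c (fun x => x)).getD 0

-- ===== PORT B =====
def solve_alt (H : Int) (W : Int) (N : Int) (A : List (List Int)) (B : List Int) : Int :=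
  -- pass 1: first = {} ; for h in range(H): for v in A[h]: if v not in first: first[v] = h
  let first : PySem.Dict Int Int :=
    (PySem.List.pyRange 0 H 1).foldl (fun d h =>
      (PySem.List.pyGetD A h []).foldl (fun d v =>
        if d.contains v then d else d.insert v h) d) PySem.Dict.empty
  -- pass 2: cnt = {} ; for i in range(N): cnt[B[i]] = cnt.get(B[i], 0) + 1
  let cnt : PySem.Dict Int Int :=
    (PySem.List.pyRange 0 N 1).foldl (fun d i =>
      d.insert (PySem.List.pyGetD B i 0) (d.getD (PySem.List.pyGetD B i 0) 0 + 1)) PySem.Dict.empty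
  -- pass 3: rows = [0]*H ; for v, k in cnt.items(): if v in first: rows[first[v]] += k
  let rows0 := PySem.List.pyRepeat [(0 : Int)] H
  let rows := cnt.items.foldl (fun rows p =>
    if first.contains p.1 then
      PySem.List.pySetD rows (first.getD p.1 0)
        (PySem.List.pyGetD rows (first.getD p.1 0) 0 + p.2)
    else rows) rows0
  (PySem.List.max? rows (fun x => x)).getD 0

-- ===== PRECONDITION & SPEC =====
-- Pre_ excludes: H ≤ 0 (max([]) raises ValueError), N > len(B) (B[i] raises IndexError), and H > len(A),
-- where A raises IndexError unless every query happens to match an earlier row (a rare accident on which B raises).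
def Pre_solve (H : Int) (W : Int) (N : Int) (A : List (List Int)) (B : List Int) : Prop :=
  0 < H ∧ H ≤ (A.length : Int) ∧ N ≤ (B.length : Int)
instance (H : Int) (W : Int) (N : Int) (A : List (List Int)) (B : List Int) : Decidable (Pre_solve H W N A B) := by unfold Pre_solve; infer_instance

def pvWitness_solve : Int × Int × Int × List (List Int) × List Int :=
  (2, 3, 3, [[1, 5], [2]], [2, 5, 7])

def Spec_solve (H : Int) (W : Int) (N : Int) (A : List (List Int)) (B : List Int) (out : Int) : Prop := out = solve_alt H W N A B
instance (H : Int) (W : Int) (N : Int) (A : List (List Int)) (B : List Int) (out : Int) : Decidable (Spec_solve H W N A B out) := by unfold Spec_solve; infer_instance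

-- ===== CLAIM (what is proved, stated in full; the proofs are below) =====
def Claim_equal_solve : Prop := ∀ (H : Int) (W : Int) (N : Int) (A : List (List Int)) (B : List Int), Dom_solve H W N A B → Pre_solve H W N A B → Spec_solve H W N A B (solve H W N A B)

-- ===== LEMMAS AND PROOFS =====

-- first row h ∈ range(H) whose A[h] contains v — the value both programs organise their counting around
def firstRow (A : List (List Int)) (H : Int) (v : Int) : Option Int :=
  (PySem.List.pyRange 0 H 1).find? (fun h => decide (v ∈ PySem.List.pyGetD A h []))

-- abstract per-query step of A's outer loop: bump the entry of the query's first row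
def stepQ (A : List (List Int)) (H : Int) (c : List Int) (v : Int) : List Int :=
  match firstRow A H v with
  | some h => PySem.List.pySetD c h (PySem.List.pyGetD c h 0 + 1)
  | none => c

-- abstract step of B's pass 3
def rowsStep (A : List (List Int)) (H : Int) (rows : List Int) (p : Int × Int) : List Int :=
  match firstRow A H p.1 with
  | some h => PySem.List.pySetD rows h (PySem.List.pyGetD rows h 0 + p.2)
  | none => rows

lemma firstRow_pos {A : List (List Int)} {H v h : Int} (h1 : firstRow A H v = some h) :
    0 ≤ h ∧ h < H := by
  have := List.mem_of_find?_eq_some h1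
  exact PySem.List.mem_pyRange_one.mp this

lemma getD_set (c : List Int) (i j : Nat) (a : Int) (hi : i < c.length) :
    (c.set i a).getD j 0 = if j = i then a else c.getD j 0 := by
  rw [List.getD_eq_getElem?_getD, List.getD_eq_getElem?_getD, List.getElem?_set]
  by_cases h : j = i
  · subst h; simp [hi]
  · rw [if_neg (fun hh => h hh.symm), if_neg h]

-- A's inner loop with break is the first-match update
lemma solveInner_eq (b : Int) (A : List (List Int)) (hs : List Int) (c : List Int) :
    solveInner b A hs c =
      match hs.find? (fun h => decide (b ∈ PySem.List.pyGetD A h [])) with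
      | some h => PySem.List.pySetD c h (PySem.List.pyGetD c h 0 + 1)
      | none => c := by
  induction hs with
  | nil => rfl
  | cons h rest ih =>
    by_cases hb : b ∈ PySem.List.pyGetD A h []
    · simp [solveInner, List.find?, hb]
    · simp [solveInner, List.find?, hb, ih]

lemma length_foldl_stepQ (A : List (List Int)) (H : Int) (qs : List Int) (c : List Int) :
    (qs.foldl (stepQ A H) c).length = c.length := by
  induction qs generalizing c with
  | nil => rfl
  | cons q qs ih =>
    rw [List.foldl_cons, ih]
    unfold stepQ
    cases hf : firstRow A H q with
    | none => rfl
    | some h =>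
      dsimp only
      rw [PySem.List.pySetD_of_nonneg _ _ (firstRow_pos hf).1, List.length_set]

-- A's fold, entrywise: entry j counts the queries whose first row is j
lemma foldl_stepQ_getD (A : List (List Int)) (H : Int) (qs : List Int) (c : List Int)
    (hc : c.length = H.toNat) (j : Nat) (hj : j < H.toNat) :
    ((qs.foldl (stepQ A H) c).getD j 0)
      = c.getD j 0 + (qs.countP (fun v => firstRow A H v == some (j : Int)) : Int) := by
  induction qs generalizing c with
  | nil => simp
  | cons q qs ih =>
    rw [List.foldl_cons, List.countP_cons]
    have hlen : (stepQ A H c q).length = H.toNat := by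
      unfold stepQ
      cases hf : firstRow A H q with
      | none => exact hc
      | some h => dsimp only; rw [PySem.List.pySetD_of_nonneg _ _ (firstRow_pos hf).1, List.length_set, hc]
    rw [ih _ hlen]
    have hstep : (stepQ A H c q).getD j 0 = c.getD j 0 + if firstRow A H q == some (j : Int) then 1 else 0 := by
      unfold stepQ
      cases hf : firstRow A H q with
      | none => simp
      | some h =>
        dsimp only
        obtain ⟨hp, hlt⟩ := firstRow_pos hf
        rw [PySem.List.pySetD_of_nonneg _ _ hp, PySem.List.pyGetD_of_nonneg _ _ hp]
        have hh : h.toNat < c.length := by omega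
        rw [getD_set _ _ _ _ hh]
        by_cases hje : (j : Int) = h
        · have hj2 : j = h.toNat := by omega
          subst hj2
          simp [Int.toNat_of_nonneg hp]
        · have hj2 : j ≠ h.toNat := by omega
          have hb : (some h == some ((j : Nat) : Int)) = false := by
            simp; omega
          simp [hj2, hb]
    rw [hstep]
    push_cast
    ring

-- inner row pass of B's pass 1: insert-if-absent
lemma row_fold_get? (row : List Int) (h : Int) (d : PySem.Dict Int Int) (v : Int) :
    ((row.foldl (fun d v => if d.contains v then d else d.insert v h) d).get? v)
      = match d.get? v with
        | some x => some x
        | none => if v ∈ row then some h else none := by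
  induction row generalizing d with
  | nil => cases hd : d.get? v <;> simp [hd]
  | cons w row ih =>
    rw [List.foldl_cons, ih]
    by_cases hw : d.contains w
    · rw [if_pos hw]
      cases hd : d.get? v with
      | some x => simp
      | none =>
        have hv : v ≠ w := by
          intro he; subst he
          rw [PySem.Dict.contains_eq_isSome_get?, hd] at hw; simp at hw
        simp [hv]
    · rw [if_neg hw]
      by_cases hv : v = w
      · subst hv
        have hd : d.get? v = none := by
          rw [PySem.Dict.contains_eq_isSome_get?] at hw
          cases h : d.get? v <;> simp [h] at hw ⊢
        rw [PySem.Dict.get?_insert_self]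
        simp [hd]
      · rw [PySem.Dict.get?_insert_of_ne _ _ hv]
        cases hd : d.get? v <;> simp [hv]

-- B's pass 1: looking up the finished dict IS the first-row search
lemma first_get? (A : List (List Int)) (hs : List Int) (d : PySem.Dict Int Int) (v : Int) :
    ((hs.foldl (fun d h =>
        (PySem.List.pyGetD A h []).foldl (fun d v =>
          if d.contains v then d else d.insert v h) d) d).get? v)
      = match d.get? v with
        | some x => some x
        | none => hs.find? (fun h => decide (v ∈ PySem.List.pyGetD A h [])) := by
  induction hs generalizing d with
  | nil => cases hd : d.get? v <;> simp [hd]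
  | cons h hs ih =>
    rw [List.foldl_cons, ih, row_fold_get?]
    cases hd : d.get? v with
    | some x => simp
    | none =>
      by_cases hv : v ∈ PySem.List.pyGetD A h []
      · simp [List.find?, hv]
      · simp [List.find?, hv]

lemma length_foldl_rows (A : List (List Int)) (H : Int) (items : List (Int × Int)) (rows : List Int) :
    (items.foldl (rowsStep A H) rows).length = rows.length := by
  induction items generalizing rows with
  | nil => rfl
  | cons p items ih =>
    rw [List.foldl_cons, ih]
    unfold rowsStep
    cases hf : firstRow A H p.1 with
    | none => rfl
    | some h =>
      dsimp only
      rw [PySem.List.pySetD_of_nonneg _ _ (firstRow_pos hf).1, List.length_set]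

-- B's pass 3, entrywise: entry j sums the counts of the distinct values whose first row is j
lemma foldl_rows_getD (A : List (List Int)) (H : Int) (items : List (Int × Int)) (rows : List Int)
    (hr : rows.length = H.toNat) (j : Nat) (hj : j < H.toNat) :
    ((items.foldl (rowsStep A H) rows).getD j 0)
      = rows.getD j 0 + ((items.filter (fun p => firstRow A H p.1 == some (j : Int))).map (·.2)).sum := by
  induction items generalizing rows with
  | nil => simp
  | cons p items ih =>
    rw [List.foldl_cons, List.filter_cons]
    have hlen : (rowsStep A H rows p).length = H.toNat := by
      unfold rowsStep
      cases hf : firstRow A H p.1 with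
      | none => exact hr
      | some h => dsimp only; rw [PySem.List.pySetD_of_nonneg _ _ (firstRow_pos hf).1, List.length_set, hr]
    rw [ih _ hlen]
    have hstep : (rowsStep A H rows p).getD j 0
        = rows.getD j 0 + if firstRow A H p.1 == some (j : Int) then p.2 else 0 := by
      unfold rowsStep
      cases hf : firstRow A H p.1 with
      | none => simp
      | some h =>
        dsimp only
        obtain ⟨hp, hlt⟩ := firstRow_pos hf
        rw [PySem.List.pySetD_of_nonneg _ _ hp, PySem.List.pyGetD_of_nonneg _ _ hp]
        have hh : h.toNat < rows.length := by omega
        rw [getD_set _ _ _ _ hh]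
        by_cases hje : (j : Int) = h
        · have hj2 : j = h.toNat := by omega
          subst hj2
          simp [Int.toNat_of_nonneg hp]
        · have hj2 : j ≠ h.toNat := by omega
          have hb : (some h == some ((j : Nat) : Int)) = false := by
            simp; omega
          simp [hj2, hb]
    rw [hstep]
    by_cases hcond : firstRow A H p.1 == some (j : Int)
    · simp only [hcond, if_true, List.map_cons, List.sum_cons]
      ring
    · simp only [hcond]
      simp

-- grouping: summing qs.count over the distinct values satisfying p is qs.countP p
lemma sum_count_dedup (S : List Int) (hS : S.Nodup) (p : Int → Bool) (qs : List Int)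
    (hmem : ∀ v ∈ qs, v ∈ S) :
    (((S.filter p).map (fun v => (qs.count v : Int))).sum) = (qs.countP p : Int) := by
  induction qs with
  | nil => simp
  | cons q qs ih =>
    have hmem' : ∀ v ∈ qs, v ∈ S := fun v hv => hmem v (List.mem_cons_of_mem _ hv)
    have hq : q ∈ S := hmem q List.mem_cons_self
    have hcount : ∀ v : Int, ((q :: qs).count v : Int) = (qs.count v : Int) + if v == q then 1 else 0 := by
      intro v
      rw [List.count_cons]
      push_cast
      by_cases h : v = q
      · simp [h]
      · simp [h, Ne.symm h]
    calc ((S.filter p).map (fun v => ((q :: qs).count v : Int))).sum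
        = ((S.filter p).map (fun v => (qs.count v : Int) + if v == q then 1 else 0)).sum := by
          congr 1; exact List.map_congr_left (fun v _ => hcount v)
      _ = ((S.filter p).map (fun v => (qs.count v : Int))).sum
            + ((S.filter p).map (fun v => if v == q then (1:Int) else 0)).sum := by
          rw [PySem.List.sum_map_add_int]
      _ = (qs.countP p : Int) + if p q then 1 else 0 := by
          rw [ih hmem']
          congr 1
          rw [PySem.List.sum_map_ite_one_zero]
          rw [show List.countP (fun v => v == q) (S.filter p) = List.count q (S.filter p) from rfl]
          by_cases hpq : p q
          · rw [List.count_eq_one_of_mem (hS.filter p) (List.mem_filter.mpr ⟨hq, hpq⟩)]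
            simp [hpq]
          · rw [List.count_eq_zero_of_not_mem (fun hin => hpq (List.of_mem_filter hin))]
            simp [hpq]
      _ = ((q :: qs).countP p : Int) := by
          rw [List.countP_cons]
          push_cast
          split_ifs <;> simp

-- ===== VERDICT (by name: the statement is the Claim_ definition above) =====
-- the two result arrays are equal entry by entry
lemma result_lists_eq (H : Int) (A : List (List Int)) (B : List Int) (N : Int) :
    ((PySem.List.pyRange 0 N 1).map (fun i => PySem.List.pyGetD B i 0)).foldl (stepQ A H)
        (PySem.List.pyRepeat [(0 : Int)] H)
      = ((PySem.Dict.counter ((PySem.List.pyRange 0 N 1).map (fun i => PySem.List.pyGetD B i 0))).items).foldl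
          (rowsStep A H) (PySem.List.pyRepeat [(0 : Int)] H) := by
  set qs := (PySem.List.pyRange 0 N 1).map (fun i => PySem.List.pyGetD B i 0) with hqs
  have hc0 : PySem.List.pyRepeat [(0 : Int)] H = List.replicate H.toNat 0 :=
    PySem.List.pyRepeat_singleton 0 H
  rw [hc0]
  have hlen0 : (List.replicate H.toNat (0 : Int)).length = H.toNat := List.length_replicate
  apply List.ext_getElem
  · rw [length_foldl_stepQ, length_foldl_rows]
  · intro j hj1 hj2
    rw [length_foldl_stepQ, hlen0] at hj1
    have e1 := foldl_stepQ_getD A H qs (List.replicate H.toNat 0) hlen0 j hj1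
    have e2 := foldl_rows_getD A H (PySem.Dict.counter qs).items (List.replicate H.toNat 0) hlen0 j hj1
    have hsum : (((PySem.Dict.counter qs).items.filter
          (fun p => firstRow A H p.1 == some (j : Int))).map (·.2)).sum
        = (qs.countP (fun v => firstRow A H v == some (j : Int)) : Int) := by
      rw [PySem.Dict.items_counter, List.filter_map, List.map_map]
      exact sum_count_dedup (PySem.Set.ofList qs) (PySem.Set.nodup_ofList qs)
        (fun v => firstRow A H v == some (j : Int)) qs
        (fun v hv => (PySem.Set.mem_ofList qs v).mpr hv)
    have hl1 : j < (qs.foldl (stepQ A H) (List.replicate H.toNat 0)).length := by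
      rw [length_foldl_stepQ, hlen0]; exact hj1
    have hl2 : j < ((PySem.Dict.counter qs).items.foldl (rowsStep A H) (List.replicate H.toNat 0)).length := by
      rw [length_foldl_rows, hlen0]; exact hj1
    rw [← List.getD_eq_getElem _ 0 hl1, ← List.getD_eq_getElem _ 0 hl2, e1, e2, hsum]

theorem solve_spec : Claim_equal_solve := by
  intro H W N A B hdom hpre
  unfold Spec_solve solve solve_alt
  dsimp only
  -- A's outer loop is the abstract per-query fold over the query values
  have hA : (fun (c : List Int) (i : Int) =>
        solveInner (PySem.List.pyGetD B i 0) A (PySem.List.pyRange 0 H 1) c)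
      = fun (c : List Int) (i : Int) => stepQ A H c (PySem.List.pyGetD B i 0) := by
    funext c i
    rw [solveInner_eq]
    rfl
  rw [hA, ← List.foldl_map]
  -- B's pass 2 builds exactly Counter(queries)
  have hcnt : (PySem.List.pyRange 0 N 1).foldl (fun d i =>
        d.insert (PySem.List.pyGetD B i 0) (d.getD (PySem.List.pyGetD B i 0) 0 + 1))
        PySem.Dict.empty
      = PySem.Dict.counter ((PySem.List.pyRange 0 N 1).map (fun i => PySem.List.pyGetD B i 0)) := by
    rw [← PySem.Dict.foldl_insert_getD_add_one_eq_counter, List.foldl_map]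
  rw [hcnt]
  -- B's pass 1 lookups are the first-row search
  set first : PySem.Dict Int Int :=
    (PySem.List.pyRange 0 H 1).foldl (fun d h =>
      (PySem.List.pyGetD A h []).foldl (fun d v =>
        if d.contains v then d else d.insert v h) d) PySem.Dict.empty with hfirstdef
  have hfirst : ∀ v, first.get? v = firstRow A H v := by
    intro v
    rw [hfirstdef, first_get? A _ PySem.Dict.empty v]
    simp [firstRow]
  -- B's pass 3 is the abstract rows fold
  have hB : (fun (rows : List Int) (p : Int × Int) =>
        if first.contains p.1 then
          PySem.List.pySetD rows (first.getD p.1 0)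
            (PySem.List.pyGetD rows (first.getD p.1 0) 0 + p.2)
        else rows)
      = rowsStep A H := by
    funext rows p
    have h1 := hfirst p.1
    unfold rowsStep
    cases hf : firstRow A H p.1 with
    | some h =>
      rw [hf] at h1
      have hc : first.contains p.1 = true := by
        rw [PySem.Dict.contains_eq_isSome_get?, h1]; rfl
      have hg : first.getD p.1 0 = h := by
        rw [PySem.Dict.getD_eq_get?_getD, h1]; rfl
      simp [hc, hg]
    | none =>
      rw [hf] at h1
      have hc : first.contains p.1 = false := by
        rw [PySem.Dict.contains_eq_isSome_get?, h1]; rfl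
      simp [hc]
  rw [hB, result_lists_eq H A B N]
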